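-- pv_equiv track=rewrite | github.com/arccode/factory | py/test/i18n/html_translator.py | _AddKeyValueToAttrs
-- ===== SOURCE A (Python) =====
-- def _AddKeyValueToAttrs(attrs, key, value):
--   result = []
--   done = False
--   for attr in attrs:
--     if done:
--       result.append(attr)
--       continue
--     if attr[0] == key:
--       result.append((attr[0], attr[1] + ' ' + value))
--       done = True
--     else:
--       result.append(attr)
--   if not done:
--     result.append((key, value))
--   return result
-- ===== SOURCE B (Python) =====
-- def _AddKeyValueToAttrs(attrs, key, value):
--   attrs = list(attrs)
--   idx = next((i for i, a in enumerate(attrs) if a[0] == key), None)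
--   if idx is None:
--     return attrs + [(key, value)]
--   return attrs[:idx] + [(attrs[idx][0], attrs[idx][1] + ' ' + value)] + attrs[idx + 1:]
-- ===== Notes on version B (the rewrite author's own statement) =====
-- stated objective: simpler
-- what changed: Replaces the element-by-element copy loop with a done sentinel by a search for the first matching index followed by slice-and-concatenate reconstruction.
import Mathlib
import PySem

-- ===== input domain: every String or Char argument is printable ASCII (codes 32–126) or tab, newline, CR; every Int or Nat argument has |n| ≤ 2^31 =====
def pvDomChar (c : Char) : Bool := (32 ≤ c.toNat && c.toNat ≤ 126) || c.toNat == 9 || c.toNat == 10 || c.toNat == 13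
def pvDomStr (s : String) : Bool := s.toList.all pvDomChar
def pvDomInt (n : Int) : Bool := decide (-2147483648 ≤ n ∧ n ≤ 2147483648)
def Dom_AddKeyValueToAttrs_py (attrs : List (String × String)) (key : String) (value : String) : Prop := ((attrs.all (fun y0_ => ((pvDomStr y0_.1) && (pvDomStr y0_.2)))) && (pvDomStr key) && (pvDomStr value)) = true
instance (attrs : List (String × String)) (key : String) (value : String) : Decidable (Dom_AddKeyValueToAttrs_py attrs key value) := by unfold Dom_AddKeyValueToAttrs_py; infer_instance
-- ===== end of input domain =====

-- B replaces A's copy loop with a done sentinel by a first-match index search plus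
-- slice-and-concatenate reconstruction (objective: simpler decomposition, same cost).

-- ===== PORT A =====
-- A's for-loop over attrs carrying (result, done)
def AddKeyValueToAttrs_loopA (key value : String) :
    List (String × String) → List (String × String) × Bool → List (String × String) × Bool
  | [], st => st
  | attr :: rest, (result, done) =>
    if done then
      AddKeyValueToAttrs_loopA key value rest (result ++ [attr], done)
    else if attr.1 == key then
      AddKeyValueToAttrs_loopA key value rest (result ++ [(attr.1, attr.2 ++ " " ++ value)], true)
    else
      AddKeyValueToAttrs_loopA key value rest (result ++ [attr], done)

def AddKeyValueToAttrs_py (attrs : List (String × String)) (key : String) (value : String) : List (String × String) :=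
  let st := AddKeyValueToAttrs_loopA key value attrs ([], false)
  if !st.2 then st.1 ++ [(key, value)] else st.1

-- ===== PORT B =====
-- index of the first attr whose key matches (Source B's next(... enumerate ...))
def AddKeyValueToAttrs_findIdx (key : String) : List (String × String) → Option Nat
  | [] => none
  | a :: rest => if a.1 == key then some 0 else (AddKeyValueToAttrs_findIdx key rest).map (· + 1)

def AddKeyValueToAttrs_py_alt (attrs : List (String × String)) (key : String) (value : String) : List (String × String) :=
  match AddKeyValueToAttrs_findIdx key attrs with
  | none => attrs ++ [(key, value)]
  | some i =>
    match attrs[i]? with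
    | some a => attrs.take i ++ [(a.1, a.2 ++ " " ++ value)] ++ attrs.drop (i + 1)
    | none => attrs ++ [(key, value)]  -- unreachable: findIdx returns an in-range index

-- ===== PRECONDITION & SPEC =====
def Spec_AddKeyValueToAttrs_py (attrs : List (String × String)) (key : String) (value : String) (out : List (String × String)) : Prop := out = AddKeyValueToAttrs_py_alt attrs key value
instance (attrs : List (String × String)) (key : String) (value : String) (out : List (String × String)) : Decidable (Spec_AddKeyValueToAttrs_py attrs key value out) := by unfold Spec_AddKeyValueToAttrs_py; infer_instance

-- ===== CLAIM (what is proved, stated in full; the proofs are below) =====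
def Claim_equal_AddKeyValueToAttrs_py : Prop := ∀ (attrs : List (String × String)) (key : String) (value : String), Dom_AddKeyValueToAttrs_py attrs key value → Spec_AddKeyValueToAttrs_py attrs key value (AddKeyValueToAttrs_py attrs key value)

-- ===== LEMMAS AND PROOFS =====

-- once done is set, the loop just copies the rest
theorem loopA_done (key value : String) (attrs : List (String × String)) (result : List (String × String)) :
    AddKeyValueToAttrs_loopA key value attrs (result, true) = (result ++ attrs, true) := by
  induction attrs generalizing result with
  | nil => simp [AddKeyValueToAttrs_loopA]
  | cons a rest ih => simp [AddKeyValueToAttrs_loopA, ih]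

-- B's cons step when the head does not match
theorem alt_cons_ne (a : String × String) (rest : List (String × String)) (key value : String)
    (h : (a.1 == key) = false) :
    AddKeyValueToAttrs_py_alt (a :: rest) key value = a :: AddKeyValueToAttrs_py_alt rest key value := by
  unfold AddKeyValueToAttrs_py_alt
  simp only [AddKeyValueToAttrs_findIdx, h, if_false, Bool.false_eq_true]
  cases hf : AddKeyValueToAttrs_findIdx key rest with
  | none => simp
  | some i =>
    simp only [Option.map_some]
    have : (a :: rest)[i + 1]? = rest[i]? := by simp
    rw [this]
    cases rest[i]? with
    | none => simp
    | some b => simp [List.take_succ_cons, List.drop_succ_cons]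

-- A's run from an accumulator equals the accumulator followed by B's result
theorem loopA_eq_alt (attrs : List (String × String)) (key value : String) (result : List (String × String)) :
    (let st := AddKeyValueToAttrs_loopA key value attrs (result, false)
     if !st.2 then st.1 ++ [(key, value)] else st.1)
      = result ++ AddKeyValueToAttrs_py_alt attrs key value := by
  induction attrs generalizing result with
  | nil =>
    simp [AddKeyValueToAttrs_loopA, AddKeyValueToAttrs_py_alt, AddKeyValueToAttrs_findIdx]
  | cons a rest ih =>
    by_cases h : (a.1 == key) = true
    · simp only [AddKeyValueToAttrs_loopA, Bool.false_eq_true, if_false, h, if_true,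
        loopA_done]
      unfold AddKeyValueToAttrs_py_alt
      simp [AddKeyValueToAttrs_findIdx, h]
    · have h' : (a.1 == key) = false := by simpa using h
      simp only [AddKeyValueToAttrs_loopA, Bool.false_eq_true, if_false, h', ]
      rw [ih (result ++ [a]), alt_cons_ne a rest key value h']
      simp

-- ===== VERDICT (by name: the statement is the Claim_ definition above) =====
theorem AddKeyValueToAttrs_py_spec : Claim_equal_AddKeyValueToAttrs_py := by
  intro attrs key value _
  unfold Spec_AddKeyValueToAttrs_py AddKeyValueToAttrs_py
  simpa using loopA_eq_alt attrs key value []
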